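-- pv_equiv track=rewrite | github.com/chaeryeon823/Coding-Test | PROGRAMMERS/17677.py | divide_str
-- ===== SOURCE A (Python) =====
-- def divide_str(str):
--     arr = []
--     for i in range(len(str) - 1):
--         if str[i].isalpha() and str[i + 1].isalpha():
--             arr.append(str[i] + str[i + 1])
--         else:
--             continue
--     return arr
-- ===== SOURCE B (Python) =====
-- def divide_str(str):
--     # Tokenize into maximal runs of alphabetic characters, then emit the
--     # adjacent pairs inside each run.
--     runs = []
--     cur = []
--     for ch in str:
--         if ch.isalpha():
--             cur.append(ch)
--         else:
--             runs.append(cur)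
--             cur = []
--     runs.append(cur)
--     return [run[j] + run[j + 1] for run in runs for j in range(len(run) - 1)]
-- ===== Notes on version B (the rewrite author's own statement) =====
-- stated objective: alternative
-- what changed: B first partitions the string into maximal runs of consecutive alphabetic characters and then emits the adjacent pairs inside each run, instead of A's single indexed scan that tests isalpha on every adjacent position pair.
import Mathlib
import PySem

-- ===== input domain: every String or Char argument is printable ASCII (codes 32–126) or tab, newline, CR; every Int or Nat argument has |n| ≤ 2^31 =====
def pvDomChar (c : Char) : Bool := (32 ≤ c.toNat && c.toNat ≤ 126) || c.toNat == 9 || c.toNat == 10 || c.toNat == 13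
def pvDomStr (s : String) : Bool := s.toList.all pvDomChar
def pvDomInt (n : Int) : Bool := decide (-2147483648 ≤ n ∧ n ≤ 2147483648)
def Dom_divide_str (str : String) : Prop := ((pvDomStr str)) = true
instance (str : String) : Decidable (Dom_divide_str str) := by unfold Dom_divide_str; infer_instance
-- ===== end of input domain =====

-- B tokenizes the string into maximal alphabetic runs and emits each run's adjacent pairs,
-- instead of A's indexed scan testing isalpha on both members of every adjacent pair (objective: alternative).


-- ===== PORT A =====
-- for i in range(len(str)-1): if str[i].isalpha() and str[i+1].isalpha(): arr.append(str[i]+str[i+1])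
def divide_str (str : String) : List String :=
  let cs := str.toList
  (List.range (cs.length - 1)).foldl
    (fun arr i =>
      if PySem.Chars.isalpha (cs.getD i ' ') && PySem.Chars.isalpha (cs.getD (i + 1) ' ')
      then arr ++ [String.mk [cs.getD i ' ', cs.getD (i + 1) ' ']]
      else arr) []

-- ===== PORT B =====
-- the run accumulator loop of Source B: runs.append(cur) on each non-alpha char and once at the end
def pvRuns : List Char → List Char → List (List Char)
  | [], cur => [cur]
  | c :: rest, cur =>
      if PySem.Chars.isalpha c then pvRuns rest (cur ++ [c]) else cur :: pvRuns rest []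

-- run[j] + run[j+1] for j in range(len(run)-1)
def pvPairs (run : List Char) : List String :=
  (List.range (run.length - 1)).map
    (fun j => String.mk [run.getD j ' ', run.getD (j + 1) ' '])

def divide_str_alt (str : String) : List String :=
  (pvRuns str.toList []).flatMap pvPairs

-- ===== PRECONDITION & SPEC =====
def Spec_divide_str (str : String) (out : List String) : Prop := out = divide_str_alt str
instance (str : String) (out : List String) : Decidable (Spec_divide_str str out) := by unfold Spec_divide_str; infer_instance

-- ===== CLAIM (what is proved, stated in full; the proofs are below) =====
def Claim_equal_divide_str : Prop := ∀ (str : String), Dom_divide_str str → Spec_divide_str str (divide_str str)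

-- ===== LEMMAS AND PROOFS =====

-- reference description of A's output: adjacent pairs whose two members are both alphabetic
def pvAdj : List Char → List String
  | [] => []
  | [_] => []
  | a :: b :: t =>
      (if PySem.Chars.isalpha a && PySem.Chars.isalpha b then [String.mk [a, b]] else []) ++ pvAdj (b :: t)

-- all adjacent pairs, no test
def pvAll : List Char → List String
  | [] => []
  | [_] => []
  | a :: b :: t => String.mk [a, b] :: pvAll (b :: t)

-- shifting the scan index by one drops the head of the list
theorem pvShift (a : Char) (cs : List Char) (n : Nat) :
    List.map (fun i => String.mk [(a :: cs).getD i ' ', (a :: cs).getD (i + 1) ' '])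
      (((List.range n).map Nat.succ).filter
        (fun i => PySem.Chars.isalpha ((a :: cs).getD i ' ') && PySem.Chars.isalpha ((a :: cs).getD (i + 1) ' ')))
    = List.map (fun i => String.mk [cs.getD i ' ', cs.getD (i + 1) ' '])
        ((List.range n).filter
          (fun i => PySem.Chars.isalpha (cs.getD i ' ') && PySem.Chars.isalpha (cs.getD (i + 1) ' '))) := by
  rw [List.filter_map, List.map_map]
  have hp : ((fun i => PySem.Chars.isalpha ((a :: cs).getD i ' ') && PySem.Chars.isalpha ((a :: cs).getD (i + 1) ' ')) ∘ Nat.succ)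
      = (fun i => PySem.Chars.isalpha (cs.getD i ' ') && PySem.Chars.isalpha (cs.getD (i + 1) ' ')) := by
    funext i; simp [Function.comp]
  have hg : ((fun i => String.mk [(a :: cs).getD i ' ', (a :: cs).getD (i + 1) ' ']) ∘ Nat.succ)
      = (fun i => String.mk [cs.getD i ' ', cs.getD (i + 1) ' ']) := by
    funext i; simp [Function.comp]
  rw [hp, hg]

theorem pvPairs_eq_pvAll (run : List Char) : pvPairs run = pvAll run := by
  induction run with
  | nil => rfl
  | cons a tail ih =>
    cases tail with
    | nil => rfl
    | cons b t =>
      simp only [pvPairs, pvAll, List.length_cons, Nat.add_sub_cancel,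
        List.range_succ_eq_map, List.map_cons, List.map_map] at *
      refine List.cons_eq_cons.mpr ⟨by simp, ?_⟩
      rw [← ih]
      apply List.map_congr_left
      intro j _
      simp [Function.comp]

theorem divide_str_eq_pvAdj (cs : List Char) :
    (List.range (cs.length - 1)).foldl
      (fun arr i =>
        if PySem.Chars.isalpha (cs.getD i ' ') && PySem.Chars.isalpha (cs.getD (i + 1) ' ')
        then arr ++ [String.mk [cs.getD i ' ', cs.getD (i + 1) ' ']]
        else arr) [] = pvAdj cs := by
  rw [PySem.List.foldl_append_if
    (p := fun i => PySem.Chars.isalpha (cs.getD i ' ') && PySem.Chars.isalpha (cs.getD (i + 1) ' '))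
    (f := fun i => String.mk [cs.getD i ' ', cs.getD (i + 1) ' '])]
  simp only [List.nil_append]
  induction cs with
  | nil => rfl
  | cons a tail ih =>
    cases tail with
    | nil => rfl
    | cons b t =>
      simp only [List.length_cons, Nat.add_sub_cancel] at *
      rw [List.range_succ_eq_map, List.filter_cons]
      by_cases h : PySem.Chars.isalpha a && PySem.Chars.isalpha b
      · rw [if_pos (by simpa using h), List.map_cons, pvShift a (b :: t) t.length, ih]
        simp [pvAdj, h]
      · rw [if_neg (by simpa using h), pvShift a (b :: t) t.length, ih]
        simp [pvAdj, h]

theorem pvAdj_allalpha (cur : List Char)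
    (h : ∀ x ∈ cur, PySem.Chars.isalpha x = true) : pvAdj cur = pvAll cur := by
  induction cur with
  | nil => rfl
  | cons a tail ih =>
    cases tail with
    | nil => rfl
    | cons b t =>
      have ha := h a (by simp)
      have hb := h b (by simp)
      simp only [pvAdj, pvAll, ha, hb, Bool.and_self, if_true, List.singleton_append]
      exact congrArg _ (ih (fun x hx => h x (by simp [hx])))

theorem pvAdj_cons_nonalpha (c : Char) (rest : List Char)
    (hc : PySem.Chars.isalpha c = false) : pvAdj (c :: rest) = pvAdj rest := by
  cases rest with
  | nil => rfl
  | cons d t => simp [pvAdj, hc]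

theorem pvAdj_append_nonalpha (cur : List Char) (c : Char) (rest : List Char)
    (h : ∀ x ∈ cur, PySem.Chars.isalpha x = true) (hc : PySem.Chars.isalpha c = false) :
    pvAdj (cur ++ c :: rest) = pvAll cur ++ pvAdj (c :: rest) := by
  induction cur with
  | nil => simp [pvAll]
  | cons a tail ih =>
    cases tail with
    | nil => simp [pvAdj, pvAll, hc]
    | cons b t =>
      have ha := h a (by simp)
      have hb := h b (by simp)
      simp only [List.cons_append, pvAdj, pvAll, ha, hb, Bool.and_self, if_true, List.cons_append] at *
      exact congrArg _ (ih (fun x hx => h x (by simp [hx])))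

theorem pvRuns_flatMap (cs : List Char) : ∀ cur, (∀ x ∈ cur, PySem.Chars.isalpha x = true) →
    (pvRuns cs cur).flatMap pvPairs = pvAdj (cur ++ cs) := by
  induction cs with
  | nil =>
    intro cur h
    simp [pvRuns, pvPairs_eq_pvAll, pvAdj_allalpha cur h]
  | cons c rest ih =>
    intro cur h
    by_cases hc : PySem.Chars.isalpha c = true
    · rw [show pvRuns (c :: rest) cur = pvRuns rest (cur ++ [c]) by simp [pvRuns, hc]]
      rw [ih (cur ++ [c]) (by intro x hx; rcases List.mem_append.mp hx with h1 | h1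
                              · exact h x h1
                              · simp at h1; subst h1; exact hc)]
      simp
    · have hc' : PySem.Chars.isalpha c = false := by simpa using hc
      rw [show pvRuns (c :: rest) cur = cur :: pvRuns rest [] by simp [pvRuns, hc']]
      rw [List.flatMap_cons, ih [] (by simp), pvPairs_eq_pvAll,
        pvAdj_append_nonalpha cur c rest h hc', List.nil_append,
        pvAdj_cons_nonalpha c rest hc']

-- ===== VERDICT (by name: the statement is the Claim_ definition above) =====
theorem divide_str_spec : Claim_equal_divide_str := by
  intro str _
  unfold Spec_divide_str divide_str divide_str_alt
  rw [pvRuns_flatMap str.toList [] (by simp), List.nil_append,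
    divide_str_eq_pvAdj str.toList]
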